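-- pv_equiv track=rewrite | github.com/ThomasTrepanier/log6307-final-project | data/pyscent/stackoverflow/code-dump/21637_70.py | substring
-- ===== SOURCE A (Python) =====
-- def substring(strings, final=None):
--     if final is None: final = []
--     # base case: empty list
--     if not strings: return final
--     # recursive case:
--     # work on first string in list
--     string = strings[0]
--     # add all substrings to final
--     while string:
--         final.append(string)
--         string = string[1:]
--     return substring(strings[1:], final)
-- ===== SOURCE B (Python) =====
-- def substring(strings, final=None):
--     if final is None:
--         final = []
--     for s in strings:
--         for i in range(len(s)):
--             final.append(s[i:])
--     return final
-- ===== Notes on version B (the rewrite author's own statement) =====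
-- stated objective: faster
-- what changed: Replaces the list-tail recursion (which copies strings[1:] at every step) and the destructive while-slice with a flat nested for loop appending s[i:] for each index i.
import Mathlib
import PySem

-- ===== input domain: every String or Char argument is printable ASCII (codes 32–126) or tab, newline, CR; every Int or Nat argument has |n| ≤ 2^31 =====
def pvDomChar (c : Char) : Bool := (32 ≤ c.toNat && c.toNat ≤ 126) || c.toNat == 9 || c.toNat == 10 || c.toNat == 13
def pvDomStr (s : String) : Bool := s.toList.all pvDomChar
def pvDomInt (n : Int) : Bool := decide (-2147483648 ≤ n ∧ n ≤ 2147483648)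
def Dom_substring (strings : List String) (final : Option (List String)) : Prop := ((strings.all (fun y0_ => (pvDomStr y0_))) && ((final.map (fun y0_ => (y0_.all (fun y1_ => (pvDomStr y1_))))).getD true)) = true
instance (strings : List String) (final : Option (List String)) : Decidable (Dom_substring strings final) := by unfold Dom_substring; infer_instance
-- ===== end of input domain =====

-- ===== PORT A =====
-- B replaces A's list-tail recursion + destructive while-slice with a flat nested for loop (idiomatic); return value only is proved equal (both A and B mutate a caller-supplied `final` in place identically).
-- while string: final.append(string); string = string[1:]
def sufWhile : List Char → List String → List String
  | [], final => final
  | c :: rest, final => sufWhile rest (final ++ [String.ofList (c :: rest)])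

def substring (strings : List String) (final : Option (List String)) : List String :=
  let f := final.getD []           -- if final is None: final = []
  match strings with
  | [] => f                        -- base case
  | s :: rest => substring rest (some (sufWhile s.toList f))

-- ===== PORT B =====
def substring_alt (strings : List String) (final : Option (List String)) : List String :=
  let f := final.getD []
  strings.foldl (fun acc s =>
    (PySem.List.pyRange 0 (PySem.Str.len s) 1).foldl
      (fun acc2 i => acc2 ++ [PySem.Str.slice s (some i) none]) acc) f

-- ===== PRECONDITION & SPEC =====
def Spec_substring (strings : List String) (final : Option (List String)) (out : List String) : Prop := out = substring_alt strings final
instance (strings : List String) (final : Option (List String)) (out : List String) : Decidable (Spec_substring strings final out) := by unfold Spec_substring; infer_instance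

-- ===== CLAIM (what is proved, stated in full; the proofs are below) =====
def Claim_equal_substring : Prop := ∀ (strings : List String) (final : Option (List String)), Dom_substring strings final → Spec_substring strings final (substring strings final)

-- ===== LEMMAS AND PROOFS =====
theorem sufWhile_eq (l : List Char) : ∀ f : List String,
    sufWhile l f = f ++ (List.range l.length).map (fun i => String.ofList (l.drop i)) := by
  induction l with
  | nil => intro f; simp [sufWhile]
  | cons c rest ih =>
    intro f
    simp only [sufWhile, ih, List.length_cons, List.range_succ_eq_map, List.map_cons,
      List.map_map, List.append_assoc]
    simp [Function.comp]

theorem foldl_app {α β : Type} (g : β → α) : ∀ (l : List β) (acc : List α),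
    l.foldl (fun a x => a ++ [g x]) acc = acc ++ l.map g := by
  intro l
  induction l with
  | nil => intro acc; simp
  | cons x xs ih => intro acc; simp [ih]

theorem inner_eq (s : String) (acc : List String) :
    (PySem.List.pyRange 0 (PySem.Str.len s) 1).foldl
      (fun acc2 i => acc2 ++ [PySem.Str.slice s (some i) none]) acc
      = acc ++ (List.range s.toList.length).map (fun i => String.ofList (s.toList.drop i)) := by
  rw [foldl_app]
  congr 1
  rw [show PySem.Str.len s = ((s.toList.length : Int)) by simp,
      show (0 : Int) = ((0 : Nat) : Int) by simp, PySem.List.pyRange_one]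
  simp [List.map_map, Function.comp, PySem.Str.slice, PySem.List.slice_from_natCast]

theorem substring_go (strings : List String) : ∀ f : List String,
    substring strings (some f) = strings.foldl (fun acc s =>
      (PySem.List.pyRange 0 (PySem.Str.len s) 1).foldl
        (fun acc2 i => acc2 ++ [PySem.Str.slice s (some i) none]) acc) f := by
  induction strings with
  | nil => intro f; simp [substring]
  | cons s rest ih =>
    intro f
    simp only [substring, Option.getD_some, List.foldl_cons, ih, inner_eq, sufWhile_eq]

theorem substring_eq_alt (strings : List String) (final : Option (List String)) :
    substring strings final = substring_alt strings final := by
  cases final with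
  | some f => simpa [substring_alt] using substring_go strings f
  | none =>
    have h : substring strings none = substring strings (some []) := by
      cases strings <;> simp [substring]
    rw [h]
    simpa [substring_alt] using substring_go strings []

-- ===== VERDICT (by name: the statement is the Claim_ definition above) =====
theorem substring_spec : Claim_equal_substring := by
  intro strings final _
  unfold Spec_substring
  exact substring_eq_alt strings final
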